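-- pv_equiv track=rewrite | github.com/Solarpaletten/solar-finance-core | services/api/regime/schema.py | contains_forbidden_word
-- ===== SOURCE A (Python) =====
-- from typing import Optional
--
-- FORBIDDEN_WORDS: frozenset[str] = frozenset({
--     # Trading-action vocabulary
--     "buy", "sell", "long", "short",
--     "entry", "target", "guarantee",
--     # Sprint 5.1 — Solana additions
--     "forecast", "predict", "prediction",
--     "advice", "recommend", "recommendation",
-- })
--
-- def contains_forbidden_word(text: Optional[str]) -> Optional[str]:
--     """
--     Return the first forbidden word found in `text`, or None.
--
--     Match is case-insensitive and bounded by non-letter characters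
--     so substrings like 'buying' or 'longitudinal' don't trigger.
--     We use a simple regex-free token scan to keep dependencies minimal.
--     """
--     if not text:
--         return None
--     buf = []
--     for ch in text.lower():
--         buf.append(ch if ch.isalpha() else " ")
--     tokens = "".join(buf).split()
--     for tok in tokens:
--         if tok in FORBIDDEN_WORDS:
--             return tok
--     return None
-- ===== SOURCE B (Python) =====
-- from typing import Optional
--
-- FORBIDDEN_WORDS: frozenset[str] = frozenset({
--     "buy", "sell", "long", "short",
--     "entry", "target", "guarantee",
--     "forecast", "predict", "prediction",
--     "advice", "recommend", "recommendation",
-- })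
--
-- def contains_forbidden_word(text: Optional[str]) -> Optional[str]:
--     """Single streaming pass: buffer up letters; whenever a word ends, check it
--     against FORBIDDEN_WORDS and return immediately on a hit."""
--     if not text:
--         return None
--     buf = []
--     for ch in text.lower():
--         if ch.isalpha():
--             buf.append(ch)
--         else:
--             word = "".join(buf)
--             if word in FORBIDDEN_WORDS:
--                 return word
--             buf = []
--     word = "".join(buf)
--     if word in FORBIDDEN_WORDS:
--         return word
--     return None
-- ===== Notes on version B (the rewrite author's own statement) =====
-- stated objective: alternative
-- what changed: Replaces A's three-phase pipeline (build a sanitized copy of the whole text, split it into a token list, then scan that list) with one streaming pass over text.lower() that buffers the current word and returns immediately when a completed word is forbidden, never materialising the sanitized string or the token list.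
import Mathlib
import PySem

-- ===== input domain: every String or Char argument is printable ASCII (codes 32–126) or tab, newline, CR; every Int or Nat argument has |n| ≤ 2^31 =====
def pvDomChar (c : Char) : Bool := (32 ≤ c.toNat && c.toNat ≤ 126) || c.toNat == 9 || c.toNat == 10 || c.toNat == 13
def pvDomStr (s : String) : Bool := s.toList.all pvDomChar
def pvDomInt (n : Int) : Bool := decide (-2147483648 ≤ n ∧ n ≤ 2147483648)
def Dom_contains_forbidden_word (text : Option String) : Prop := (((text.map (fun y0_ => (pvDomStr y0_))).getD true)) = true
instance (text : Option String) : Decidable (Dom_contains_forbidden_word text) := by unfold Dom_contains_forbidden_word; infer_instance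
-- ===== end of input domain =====

-- B replaces A's build-sanitized-string / split / scan-token-list pipeline by a single
-- streaming pass with a current-word buffer and early return (objective: alternative).

-- ===== PORT A =====
-- the FORBIDDEN_WORDS frozenset; only membership is ever taken, so a list of char-lists is exact
def pvForbidden : List (List Char) :=
  ["buy".toList, "sell".toList, "long".toList, "short".toList,
   "entry".toList, "target".toList, "guarantee".toList,
   "forecast".toList, "predict".toList, "prediction".toList,
   "advice".toList, "recommend".toList, "recommendation".toList]

-- 'for tok in tokens: if tok in FORBIDDEN_WORDS: return tok' / 'return None'
def pvFindTok : List (List Char) → Option String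
  | [] => none
  | t :: ts => if pvForbidden.contains t then some (String.ofList t) else pvFindTok ts

def contains_forbidden_word (text : Option String) : Option String :=
  match text with
  | none => none
  | some s =>
    if s.toList.isEmpty then none            -- 'if not text: return None'
    else
      -- buf = []; for ch in text.lower(): buf.append(ch if ch.isalpha() else " ")
      -- (each appended piece is one char, so ''.join(buf) is the char list itself)
      let buf := (PySem.Chars.lower s.toList).foldl
        (fun acc ch => acc ++ [if PySem.Chars.isalpha ch then ch else ' ']) ([] : List Char)
      pvFindTok (PySem.Chars.split₀ buf)     -- tokens = ''.join(buf).split()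

-- ===== PORT B =====
-- word = ''.join(buf); if word in FORBIDDEN_WORDS: return word (else fall through)
def pvCheck (buf : List Char) : Option String :=
  if pvForbidden.contains buf then some (String.ofList buf) else none

-- the streaming loop of Source B: buffer letters, flush and test at each non-letter
def pvScan : List Char → List Char → Option String
  | [], buf => pvCheck buf                   -- final flush after the loop
  | c :: cs, buf =>
    if PySem.Chars.isalpha c then pvScan cs (buf ++ [c])
    else
      match pvCheck buf with
      | some w => some w
      | none => pvScan cs []

def contains_forbidden_word_alt (text : Option String) : Option String :=
  match text with
  | none => none
  | some s =>
    if s.toList.isEmpty then none            -- 'if not text: return None'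
    else pvScan (PySem.Chars.lower s.toList) []

-- ===== PRECONDITION & SPEC =====
def Spec_contains_forbidden_word (text : Option String) (out : Option String) : Prop := out = contains_forbidden_word_alt text
instance (text : Option String) (out : Option String) : Decidable (Spec_contains_forbidden_word text out) := by unfold Spec_contains_forbidden_word; infer_instance

-- ===== CLAIM (what is proved, stated in full; the proofs are below) =====
def Claim_equal_contains_forbidden_word : Prop := ∀ (text : Option String), Dom_contains_forbidden_word text → Spec_contains_forbidden_word text (contains_forbidden_word text)

-- ===== LEMMAS AND PROOFS =====

theorem pv_alpha_not_space (c : Char) (h : PySem.Chars.isalpha c = true) :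
    PySem.Chars.isspace c = false := by
  unfold PySem.Chars.isalpha PySem.Chars.isupper PySem.Chars.islower at h
  unfold PySem.Chars.isspace
  simp only [Bool.or_eq_true, Bool.and_eq_true, decide_eq_true_eq, Char.le_def,
    UInt32.le_iff_toNat_le] at h ⊢
  simp only [Bool.or_eq_false_iff, Bool.and_eq_false_iff, decide_eq_false_iff_not]
  have h1 : ('A').val.toNat = 65 := rfl
  have h2 : ('Z').val.toNat = 90 := rfl
  have h3 : ('a').val.toNat = 97 := rfl
  have h4 : ('z').val.toNat = 122 := rfl
  have h5 : c.toNat = c.val.toNat := rfl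
  omega

-- split₀.go consumes a space-free prefix into the current-word accumulator
theorem pv_go_nospace (buf : List Char) (h : ∀ c ∈ buf, PySem.Chars.isspace c = false) :
    ∀ (rest cur : List Char) (acc : List (List Char)),
      PySem.Chars.split₀.go (buf ++ rest) cur acc
        = PySem.Chars.split₀.go rest (buf.reverse ++ cur) acc := by
  induction buf with
  | nil => intro rest cur acc; simp
  | cons c bs ih =>
    intro rest cur acc
    have hc : PySem.Chars.isspace c = false := h c (List.mem_cons_self)
    simp only [List.cons_append, PySem.Chars.split₀.go, hc, Bool.false_eq_true, if_false]
    rw [ih (fun x hx => h x (List.mem_cons_of_mem _ hx)) rest (c :: cur) acc]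
    simp

-- the word accumulator of split₀.go prepends (reversed) to the result
theorem pv_go_acc (cs : List Char) :
    ∀ (cur : List Char) (acc : List (List Char)),
      PySem.Chars.split₀.go cs cur acc = acc.reverse ++ PySem.Chars.split₀.go cs cur [] := by
  induction cs with
  | nil =>
    intro cur acc
    by_cases hcur : cur.isEmpty
    · simp [PySem.Chars.split₀.go, hcur]
    · simp [PySem.Chars.split₀.go, hcur]
  | cons c rest ih =>
    intro cur acc
    by_cases hc : PySem.Chars.isspace c
    · by_cases hcur : cur.isEmpty
      · simp only [PySem.Chars.split₀.go, hc, hcur, if_true]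
        exact ih [] acc
      · simp only [PySem.Chars.split₀.go, hc, hcur, if_true, Bool.false_eq_true, if_false]
        rw [ih [] (cur.reverse :: acc), ih [] [cur.reverse]]
        simp
    · simp only [PySem.Chars.split₀.go, hc, Bool.false_eq_true, if_false]
      exact ih (c :: cur) acc

-- split₀ of a space-free word
theorem pv_split_word (buf : List Char) (h : ∀ c ∈ buf, PySem.Chars.isspace c = false) :
    PySem.Chars.split₀ buf = if buf = [] then [] else [buf] := by
  unfold PySem.Chars.split₀
  rw [show buf = buf ++ [] by simp, pv_go_nospace buf h [] [] []]
  by_cases hb : buf = []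
  · simp [hb, PySem.Chars.split₀.go]
  · have : (buf.reverse ++ []).isEmpty = false := by
      simp [hb]
    simp [PySem.Chars.split₀.go, hb]

-- split₀ across a space following a space-free word
theorem pv_split_space (buf rest : List Char) (h : ∀ c ∈ buf, PySem.Chars.isspace c = false) :
    PySem.Chars.split₀ (buf ++ ' ' :: rest)
      = (if buf = [] then [] else [buf]) ++ PySem.Chars.split₀ rest := by
  unfold PySem.Chars.split₀
  rw [pv_go_nospace buf h (' ' :: rest) [] []]
  have hsp : PySem.Chars.isspace ' ' = true := by decide
  by_cases hb : buf = []
  · simp [hb, PySem.Chars.split₀.go, hsp]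
  · simp only [PySem.Chars.split₀.go, hsp, if_true, List.append_nil,
      List.reverse_reverse]
    rw [pv_go_acc rest [] [buf]]
    simp [hb]

-- the core correspondence: A's token scan over the sanitized remainder equals B's streaming scan
theorem pv_main (cs : List Char) :
    ∀ (buf : List Char), (∀ c ∈ buf, PySem.Chars.isalpha c = true) →
      pvFindTok (PySem.Chars.split₀
          (buf ++ cs.map (fun ch => if PySem.Chars.isalpha ch then ch else ' ')))
        = pvScan cs buf := by
  induction cs with
  | nil =>
    intro buf hbuf
    have hns : ∀ c ∈ buf, PySem.Chars.isspace c = false :=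
      fun c hc => pv_alpha_not_space c (hbuf c hc)
    simp only [List.map_nil, List.append_nil, pv_split_word buf hns, pvScan]
    by_cases hb : buf = []
    · rw [if_pos hb, hb]; decide
    · rw [if_neg hb]
      simp only [pvFindTok, pvCheck]
  | cons c rest ih =>
    intro buf hbuf
    have hns : ∀ x ∈ buf, PySem.Chars.isspace x = false :=
      fun x hx => pv_alpha_not_space x (hbuf x hx)
    by_cases hc : PySem.Chars.isalpha c
    · simp only [List.map_cons, hc, if_true, pvScan]
      rw [show buf ++ c :: rest.map (fun ch => if PySem.Chars.isalpha ch then ch else ' ')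
            = (buf ++ [c]) ++ rest.map (fun ch => if PySem.Chars.isalpha ch then ch else ' ')
          by simp]
      exact ih (buf ++ [c]) (by
        intro x hx
        rcases List.mem_append.mp hx with h1 | h1
        · exact hbuf x h1
        · simp at h1; subst h1; exact hc)
    · simp only [List.map_cons, hc, Bool.false_eq_true, if_false, pvScan]
      rw [pv_split_space buf _ hns]
      by_cases hb : buf = []
      · simp only [hb, if_true, List.nil_append]
        have : pvCheck ([] : List Char) = none := by decide
        rw [this]
        exact ih [] (by intro x hx; simp at hx)
      · simp only [hb, if_false, List.singleton_append, pvFindTok, pvCheck]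
        by_cases hmem : pvForbidden.contains buf = true
        · rw [if_pos hmem, if_pos hmem]
        · rw [if_neg hmem, if_neg hmem]
          exact ih [] (by intro x hx; simp at hx)

-- ===== VERDICT (by name: the statement is the Claim_ definition above) =====
theorem contains_forbidden_word_spec : Claim_equal_contains_forbidden_word := by
  intro text _hdom
  unfold Spec_contains_forbidden_word contains_forbidden_word contains_forbidden_word_alt
  match text with
  | none => rfl
  | some s =>
    by_cases hemp : s.toList.isEmpty
    · simp [hemp]
    · simp only [hemp, Bool.false_eq_true, if_false]
      rw [PySem.List.foldl_append_singleton_eq_map]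
      exact pv_main (PySem.Chars.lower s.toList) [] (by intro x hx; simp at hx)
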